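-- pv_equiv track=rewrite | github.com/kimdevspace/study-algorithm | 프로그래머스/2/154538. 숫자 변환하기/숫자 변환하기.py | solution
-- ===== SOURCE A (Python) =====
-- from collections import deque
--
-- def solution(x, y, n):
--     edge=[0]*(y+1)
--     que=deque([x])
--     while que:
--         tmp=que.popleft()
--         if tmp==y:
--             return edge[tmp]
--         for num in [tmp+n,tmp*2,tmp*3]:
--             if num<=y and not edge[num]:
--                 que.append(num)
--                 edge[num]=edge[tmp]+1
--     return -1
-- ===== SOURCE B (Python) =====
-- def solution(x, y, n):
--     # forward DP scan instead of BFS; min-relaxation of i+n, i*2, i*3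
--     if y < x:
--         return -1
--     dp = [-1] * (y + 1)
--     dp[x] = 0
--     for i in range(x, y + 1):
--         d = dp[i]
--         if d < 0:
--             continue
--         for j in (i + n, i * 2, i * 3):
--             if j <= y and (dp[j] < 0 or dp[j] > d + 1):
--                 dp[j] = d + 1
--     return dp[y]
-- ===== Notes on version B (the rewrite author's own statement) =====
-- stated objective: alternative
-- what changed: Replaces the deque-based breadth-first search with a single forward dynamic-programming scan over x..y that min-relaxes i+n, i*2, i*3 (valid because with x,n >= 0 every operation is non-decreasing).
-- intended difference: When n == 0 and y > x is reachable (y = x*2^a*3^b), A's inner loop re-reads edge[tmp] after marking tmp itself, shifting every distance label by one, so A returns the minimal number of operations plus 1 while B returns the true minimum, which is the intended value. — e.g. on solution(2, 4, 0): A returns 2, B returns 1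
-- outside the precondition, e.g. on solution(-1, 2, 3): A returns 1, B returns 0; on solution(5, 6, -1): A returns 3, B returns -1
import Mathlib
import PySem

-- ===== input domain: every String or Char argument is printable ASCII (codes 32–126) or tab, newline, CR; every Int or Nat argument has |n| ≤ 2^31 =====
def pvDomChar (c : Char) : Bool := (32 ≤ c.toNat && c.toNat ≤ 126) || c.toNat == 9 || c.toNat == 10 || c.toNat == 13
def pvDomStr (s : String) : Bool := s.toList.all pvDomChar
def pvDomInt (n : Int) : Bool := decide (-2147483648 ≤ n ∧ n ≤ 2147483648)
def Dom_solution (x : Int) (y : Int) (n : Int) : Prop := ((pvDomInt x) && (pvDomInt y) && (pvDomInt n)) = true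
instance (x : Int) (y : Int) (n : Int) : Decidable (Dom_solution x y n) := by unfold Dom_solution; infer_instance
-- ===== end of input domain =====

-- B replaces A's deque BFS by a forward DP scan over x..y that min-relaxes i+n, i*2, i*3 (alternative algorithm, similar cost).


-- ===== PORT A =====
-- A's inner "for num in [tmp+n,tmp*2,tmp*3]" body; reads see earlier writes of the same pass,
-- exactly as in Python (edge[tmp] is re-read at every iteration).  Out-of-range reads (which
-- raise IndexError in Python, excluded by Pre_) get a junk default.
def solutionStep (y tmp : Int) (s : List Int × List Int) (num : Int) : List Int × List Int :=
  if num ≤ y ∧ PySem.List.pyGetD s.1 num 1 = 0 then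
    (PySem.List.pySetD s.1 num (PySem.List.pyGetD s.1 tmp 0 + 1), s.2 ++ [num])
  else s

-- the "while que:" loop, with fuel (Python's loop terminates; fuel is proved sufficient under Pre_)
def solutionLoop (y n : Int) : Nat → List Int → List Int → Int
  | 0, _, _ => -2
  | f + 1, edge, que =>
    match que with
    | [] => -1
    | tmp :: rest =>
      if tmp = y then PySem.List.pyGetD edge tmp (-2)
      else
        let s := [tmp + n, tmp * 2, tmp * 3].foldl (solutionStep y tmp) (edge, rest)
        solutionLoop y n f s.1 s.2

def solution (x : Int) (y : Int) (n : Int) : Int :=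
  solutionLoop y n ((2 * y + 6).toNat + 2) (List.replicate (y + 1).toNat 0) [x]

-- ===== PORT B =====
-- Source B's dp is a Python list mutated in place; it is modelled by an Array (PySem has no
-- array type).  pyAGetD / pyASetD hand-port Python's dp[i] read / dp[i] = v assignment:
-- exact for -len(dp) <= i < len(dp) (negative index from the end); out of range Python
-- raises (excluded by Pre_), here the default / a no-op.
def pyAGetD (dp : Array Int) (i : Int) (d : Int) : Int :=
  if 0 ≤ i then
    if h : i.toNat < dp.size then dp[i.toNat] else d
  else
    let j := (dp.size : Int) + i
    if h : 0 ≤ j ∧ j < (dp.size : Int) then dp[j.toNat]'(by omega) else d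

def pyASetD (dp : Array Int) (i : Int) (v : Int) : Array Int :=
  if 0 ≤ i then
    if h : i.toNat < dp.size then dp.set i.toNat v h else dp
  else
    let j := (dp.size : Int) + i
    if h : 0 ≤ j ∧ j < (dp.size : Int) then dp.set j.toNat v (by omega) else dp

-- Source B: forward DP over [x..y]; dp[j] min-relaxed by d+1 for j in (i+n, i*2, i*3)
def solutionAltRelax (y d : Int) (dp : Array Int) (j : Int) : Array Int :=
  if j ≤ y ∧ (pyAGetD dp j (-2) < 0 ∨ pyAGetD dp j (-2) > d + 1) then
    pyASetD dp j (d + 1)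
  else dp

def solutionAltBody (y n : Int) (dp : Array Int) (i : Int) : Array Int :=
  let d := pyAGetD dp i (-2)
  if d < 0 then dp
  else [i + n, i * 2, i * 3].foldl (solutionAltRelax y d) dp

def solution_alt (x : Int) (y : Int) (n : Int) : Int :=
  if y < x then -1
  else
    let dp0 := pyASetD (Array.replicate (y + 1).toNat (-1 : Int)) x 0
    let dp := (PySem.List.pyRange x (y + 1) 1).foldl (solutionAltBody y n) dp0
    pyAGetD dp y (-2)

-- ===== PRECONDITION & SPEC =====
-- Pre_ restricts to the problem's natural domain x ≥ 0, n ≥ 0: for negative x or n the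
-- intermediate values go below zero, and both programs then read/write their arrays through
-- Python's negative-index wraparound (A raises IndexError on many such inputs), so either
-- result is an artefact of the array layout rather than a specified value.
def Pre_solution (x : Int) (y : Int) (n : Int) : Prop := 0 ≤ x ∧ 0 ≤ n
instance (x : Int) (y : Int) (n : Int) : Decidable (Pre_solution x y n) := by unfold Pre_solution; infer_instance
def pvWitness_solution : Int × Int × Int := (1, 1, 1)

-- When n == 0 and y > x is reachable (y = x*2^a*3^b), A's inner loop re-reads edge[tmp] after
-- having just marked tmp itself, which shifts every distance label by one, so A returns the
-- minimal number of operations plus 1; B returns the true minimum, which is the intended value.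
def D_solution (x : Int) (y : Int) (n : Int) : Prop :=
  n = 0 ∧ x < y ∧ ∃ a : ℕ, a < 32 ∧ ∃ b : ℕ, b < 32 ∧ y = x * 2 ^ a * 3 ^ b
instance (x : Int) (y : Int) (n : Int) : Decidable (D_solution x y n) := by unfold D_solution; infer_instance

def Spec_solution (x : Int) (y : Int) (n : Int) (out : Int) : Prop :=
  ¬ D_solution x y n → out = solution_alt x y n
instance (x : Int) (y : Int) (n : Int) (out : Int) : Decidable (Spec_solution x y n out) := by unfold Spec_solution; infer_instance

def pvDiffWitness_solution : Int × Int × Int := (2, 4, 0)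
def pvDiffWitnessOut_solution : Int × Int := (2, 1)

-- ===== CLAIM (what is proved, stated in full; the proofs are below) =====
def Claim_unchanged_solution : Prop := ∀ (x : Int) (y : Int) (n : Int), Dom_solution x y n → Pre_solution x y n → Spec_solution x y n (solution x y n)
def Claim_changed_solution : Prop := Dom_solution (pvDiffWitness_solution.1) (pvDiffWitness_solution.2.1) (pvDiffWitness_solution.2.2) ∧ Pre_solution (pvDiffWitness_solution.1) (pvDiffWitness_solution.2.1) (pvDiffWitness_solution.2.2) ∧ D_solution (pvDiffWitness_solution.1) (pvDiffWitness_solution.2.1) (pvDiffWitness_solution.2.2) ∧ solution (pvDiffWitness_solution.1) (pvDiffWitness_solution.2.1) (pvDiffWitness_solution.2.2) = pvDiffWitnessOut_solution.1 ∧ solution_alt (pvDiffWitness_solution.1) (pvDiffWitness_solution.2.1) (pvDiffWitness_solution.2.2) = pvDiffWitnessOut_solution.2 ∧ pvDiffWitnessOut_solution.1 ≠ pvDiffWitnessOut_solution.2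
def Claim_exact_solution : Prop := ∀ (x : Int) (y : Int) (n : Int), Dom_solution x y n → Pre_solution x y n → D_solution x y n → solution x y n ≠ solution_alt x y n

-- ===== LEMMAS AND PROOFS =====

-- ---------- the common specification ----------

-- values reachable from x in exactly k applications of (+n), (*2), (*3)
inductive Reach (x n : Int) : ℕ → Int → Prop
  | zero : Reach x n 0 x
  | addn {k v} : Reach x n k v → Reach x n (k + 1) (v + n)
  | mul2 {k v} : Reach x n k v → Reach x n (k + 1) (v * 2)
  | mul3 {k v} : Reach x n k v → Reach x n (k + 1) (v * 3)

def Succ (n p v : Int) : Prop := v = p + n ∨ v = p * 2 ∨ v = p * 3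

def Reachable (x n v : Int) : Prop := ∃ k, Reach x n k v

def IsDist (x n v : Int) (k : ℕ) : Prop := Reach x n k v ∧ ∀ j, Reach x n j v → k ≤ j

-- A's systematic label shift: 1 when n = 0, else 0
def offs (n : Int) : Int := if n = 0 then 1 else 0

lemma offs_nonneg (n : Int) : 0 ≤ offs n := by unfold offs; split <;> norm_num

lemma reach_le {x n : Int} (hx : 0 ≤ x) (hn : 0 ≤ n) {k : ℕ} {v : Int} (h : Reach x n k v) : x ≤ v := by
  induction h with
  | zero => exact le_refl x
  | addn _ ih => omega
  | mul2 _ ih => omega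
  | mul3 _ ih => omega

lemma reach_nonneg {x n : Int} (hx : 0 ≤ x) (hn : 0 ≤ n) {k : ℕ} {v : Int} (h : Reach x n k v) : 0 ≤ v :=
  le_trans hx (reach_le hx hn h)

lemma exists_isDist {x n v : Int} (h : Reachable x n v) : ∃ k, IsDist x n v k := by
  obtain ⟨k, hk⟩ := h
  have hmem : sInf {j | Reach x n j v} ∈ {j | Reach x n j v} := Nat.sInf_mem ⟨k, hk⟩
  exact ⟨sInf {j | Reach x n j v}, hmem, fun j hj => Nat.sInf_le hj⟩

lemma isDist_unique {x n v : Int} {k j : ℕ} (h1 : IsDist x n v k) (h2 : IsDist x n v j) : k = j :=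
  le_antisymm (h1.2 j h2.1) (h2.2 k h1.1)

lemma reach_zero {x n v : Int} (h : Reach x n 0 v) : v = x := by cases h; rfl

lemma reach_succ_inv {x n : Int} {k : ℕ} {v : Int} (h : Reach x n (k + 1) v) :
    ∃ p, Reach x n k p ∧ Succ n p v := by
  cases h with
  | addn h => exact ⟨_, h, Or.inl rfl⟩
  | mul2 h => exact ⟨_, h, Or.inr (Or.inl rfl)⟩
  | mul3 h => exact ⟨_, h, Or.inr (Or.inr rfl)⟩

lemma reach_of_succ {x n : Int} {k : ℕ} {p v : Int} (h : Reach x n k p) (hs : Succ n p v) :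
    Reach x n (k + 1) v := by
  rcases hs with h1 | h2 | h3
  · exact h1 ▸ Reach.addn h
  · exact h2 ▸ Reach.mul2 h
  · exact h3 ▸ Reach.mul3 h

lemma dist_pred {x n v : Int} {k : ℕ} (h : IsDist x n v (k + 1)) :
    ∃ p, IsDist x n p k ∧ Succ n p v := by
  obtain ⟨p, hp, hs⟩ := reach_succ_inv h.1
  obtain ⟨m, hm⟩ := exists_isDist ⟨k, hp⟩
  have hmk : m ≤ k := hm.2 k hp
  have hk1 : k + 1 ≤ m + 1 := h.2 (m + 1) (reach_of_succ hm.1 hs)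
  have hmk' : m = k := by omega
  exact ⟨p, hmk' ▸ hm, hs⟩

lemma succ_ge {n p v : Int} (hp : 0 ≤ p) (hn : 0 ≤ n) (h : Succ n p v) : p ≤ v := by
  rcases h with h | h | h <;> omega

lemma succ_self_x {x n p : Int} (hx : 0 ≤ x) (hn : 0 ≤ n) (hp : x ≤ p) (h : Succ n p x) :
    p = x ∧ (n = 0 ∨ x = 0) := by
  rcases h with h | h | h <;> constructor <;> omega

lemma isDist_x_zero (x n : Int) : IsDist x n x 0 := ⟨Reach.zero, fun j _ => Nat.zero_le j⟩

lemma isDist_x {x n : Int} {k : ℕ} (h : IsDist x n x k) : k = 0 :=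
  isDist_unique h (isDist_x_zero x n)

lemma dist_chain {x n : Int} (hx0 : 0 ≤ x) (hn0 : 0 ≤ n) :
    ∀ (m : ℕ) (v : Int), IsDist x n v m → ∀ j, j ≤ m → ∃ w, IsDist x n w j ∧ w ≤ v := by
  intro m
  induction m with
  | zero => intro v h j hj; interval_cases j; exact ⟨v, h, le_refl v⟩
  | succ m ih =>
    intro v h j hj
    rcases Nat.lt_or_ge j (m + 1) with hlt | hge
    · obtain ⟨p, hp, hs⟩ := dist_pred h
      obtain ⟨w, hw, hwp⟩ := ih p hp j (by omega)
      exact ⟨w, hw, le_trans hwp (succ_ge (reach_nonneg hx0 hn0 hp.1) hn0 hs)⟩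
    · have : j = m + 1 := by omega
      exact ⟨v, this ▸ h, le_refl v⟩

-- ---------- n = 0 reachability is exactly y = x * 2^a * 3^b ----------

lemma factor_reach (x : Int) (a b : ℕ) : Reach x 0 (a + b) (x * 2 ^ a * 3 ^ b) := by
  induction b with
  | zero =>
    simp only [pow_zero, mul_one, Nat.add_zero]
    induction a with
    | zero => simpa using Reach.zero
    | succ a iha =>
      have h := Reach.mul2 iha
      have he : x * 2 ^ a * 2 = x * 2 ^ (a + 1) := by ring
      rwa [he] at h
  | succ b ihb =>
    have h := Reach.mul3 ihb
    have he : x * 2 ^ a * 3 ^ b * 3 = x * 2 ^ a * 3 ^ (b + 1) := by ring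
    rw [he] at h
    have hn : a + b + 1 = a + (b + 1) := by omega
    rwa [hn] at h

lemma reach_factor {x v : Int} {k : ℕ} (h : Reach x 0 k v) : ∃ a b : ℕ, v = x * 2 ^ a * 3 ^ b := by
  induction h with
  | zero => exact ⟨0, 0, by ring⟩
  | addn _ ih => obtain ⟨a, b, hab⟩ := ih; exact ⟨a, b, by omega⟩
  | mul2 _ ih => obtain ⟨a, b, hab⟩ := ih; exact ⟨a + 1, b, by subst hab; ring⟩
  | mul3 _ ih => obtain ⟨a, b, hab⟩ := ih; exact ⟨a, b + 1, by subst hab; ring⟩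

lemma D_of_reach {x y : Int} (hx0 : 0 ≤ x) (hxy : x < y) (hyB : y ≤ 2 ^ 31)
    (hr : Reachable x 0 y) : ∃ a : ℕ, a < 32 ∧ ∃ b : ℕ, b < 32 ∧ y = x * 2 ^ a * 3 ^ b := by
  obtain ⟨k, hk⟩ := hr
  obtain ⟨a, b, hab⟩ := reach_factor hk
  have hx1 : 1 ≤ x := by
    rcases eq_or_lt_of_le hx0 with h | h
    · exfalso; rw [← h] at hab; simp at hab; omega
    · omega
  have hA1 : (1 : ℤ) ≤ 2 ^ a := one_le_pow₀ (by norm_num)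
  have hB1 : (1 : ℤ) ≤ 3 ^ b := one_le_pow₀ (by norm_num)
  have h2a : (2 : ℤ) ^ a ≤ y := by
    calc (2 : ℤ) ^ a = 1 * 2 ^ a * 1 := by ring
    _ ≤ x * 2 ^ a * 3 ^ b := by
        apply mul_le_mul _ hB1 (by norm_num) (mul_nonneg (by omega) (by positivity))
        exact mul_le_mul hx1 le_rfl (by positivity) (by omega)
    _ = y := hab.symm
  have h3b : (3 : ℤ) ^ b ≤ y := by
    calc (3 : ℤ) ^ b = 1 * 1 * 3 ^ b := by ring
    _ ≤ x * 2 ^ a * 3 ^ b := by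
        apply mul_le_mul _ le_rfl (by positivity) (mul_nonneg (by omega) (by positivity))
        exact mul_le_mul hx1 hA1 (by norm_num) (by omega)
    _ = y := hab.symm
  refine ⟨a, ?_, b, ?_, hab⟩
  · by_contra hcon
    have h32 : (2 : ℤ) ^ 32 ≤ 2 ^ a := pow_le_pow_right₀ (by norm_num) (by omega)
    have : ((2 : ℤ) ^ 32 : ℤ) ≤ 2 ^ 31 := le_trans h32 (le_trans h2a hyB)
    norm_num at this
  · by_contra hcon
    have h32 : (3 : ℤ) ^ 32 ≤ 3 ^ b := pow_le_pow_right₀ (by norm_num) (by omega)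
    have : ((3 : ℤ) ^ 32 : ℤ) ≤ 2 ^ 31 := le_trans h32 (le_trans h3b hyB)
    norm_num at this
-- ---------- small PySem / list helpers ----------

-- A's edge value at v (all reads in the proofs go through this form)
def EV (edge : List Int) (v : Int) : Int := PySem.List.pyGetD edge v 0
-- B's dp value at v
def EVB (dp : Array Int) (v : Int) : Int := pyAGetD dp v (-2)

def zeros (l : List Int) : ℕ := l.countP (fun a => a == 0)

def measA (edge que : List Int) : ℕ := que.length + 2 * zeros edge + 1

lemma len_cast {y : Int} {edge : List Int} (hlen : edge.length = (y + 1).toNat)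
    {v : Int} (h0 : 0 ≤ v) (h1 : v ≤ y) : v < (edge.length : Int) := by
  rw [hlen]; omega

lemma getD_irrel {α : Type} (edge : List α) {v : Int} (h0v : 0 ≤ v)
    (hvlen : v < (edge.length : Int)) (d d' : α) :
    PySem.List.pyGetD edge v d = PySem.List.pyGetD edge v d' := by
  rw [PySem.List.pyGetD_eq_getElem _ d h0v hvlen, PySem.List.pyGetD_eq_getElem _ d' h0v hvlen]

lemma getD_set {α : Type} (edge : List α) {w v : Int} (h0w : 0 ≤ w)
    (hwlen : w < (edge.length : Int)) (u d : α) (h0v : 0 ≤ v) (hvlen : v < (edge.length : Int)) :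
    PySem.List.pyGetD (PySem.List.pySetD edge w u) v d =
      if v = w then u else PySem.List.pyGetD edge v d := by
  rw [PySem.List.pySetD_of_nonneg edge u h0w,
      PySem.List.pyGetD_eq_getElem _ d h0v (by rw [List.length_set]; exact hvlen),
      List.getElem_set]
  by_cases hvw : v = w
  · have hnat : w.toNat = v.toNat := by omega
    simp [hvw, hnat]
  · have hnat : w.toNat ≠ v.toNat := by omega
    rw [if_neg hnat, if_neg hvw, PySem.List.pyGetD_eq_getElem _ d h0v hvlen]

lemma EV_set {y : Int} {edge : List Int} (hlen : edge.length = (y + 1).toNat)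
    {w : Int} (h0w : 0 ≤ w) (h1w : w ≤ y) (u : Int) {v : Int} (h0v : 0 ≤ v) (h1v : v ≤ y) :
    EV (PySem.List.pySetD edge w u) v = if v = w then u else EV edge v :=
  getD_set edge h0w (len_cast hlen h0w h1w) u 0 h0v (len_cast hlen h0v h1v)

lemma pyAGetD_in {dp : Array Int} {v : Int} (h0 : 0 ≤ v) (hlt : v.toNat < dp.size) (d : Int) :
    pyAGetD dp v d = dp[v.toNat] := by
  unfold pyAGetD
  rw [if_pos h0, dif_pos hlt]

lemma pyASetD_in {dp : Array Int} {w : Int} (h0 : 0 ≤ w) (hlt : w.toNat < dp.size) (u : Int) :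
    pyASetD dp w u = dp.set w.toNat u hlt := by
  unfold pyASetD
  rw [if_pos h0, dif_pos hlt]

lemma size_pyASetD (dp : Array Int) (i v : Int) : (pyASetD dp i v).size = dp.size := by
  unfold pyASetD
  split
  · split <;> simp
  · dsimp only
    split <;> simp

lemma EVB_set {y : Int} {dp : Array Int} (hlen : dp.size = (y + 1).toNat)
    {w : Int} (h0w : 0 ≤ w) (h1w : w ≤ y) (u : Int) {v : Int} (h0v : 0 ≤ v) (h1v : v ≤ y) :
    EVB (pyASetD dp w u) v = if v = w then u else EVB dp v := by
  have hwlt : w.toNat < dp.size := by omega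
  have hvlt : v.toNat < dp.size := by omega
  unfold EVB
  rw [pyASetD_in h0w hwlt, pyAGetD_in h0v (by simpa using hvlt), pyAGetD_in h0v hvlt,
    Array.getElem_set]
  by_cases hvw : v = w
  · rw [if_pos (by omega : w.toNat = v.toNat), if_pos hvw]
  · rw [if_neg (by omega : ¬ w.toNat = v.toNat), if_neg hvw]

lemma EV_replicate (m : ℕ) (v : Int) : EV (List.replicate m 0) v = 0 := by
  by_cases h : PySem.Raise.InRange (List.replicate m (0 : Int)).length v
  · have hm : PySem.List.pyGetD (List.replicate m (0 : Int)) v 0 ∈ List.replicate m (0 : Int) :=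
      PySem.List.pyGetD_mem _ _ h
    exact List.eq_of_mem_replicate hm
  · exact PySem.List.pyGetD_of_none _ _ _ ((PySem.List.pyGet?_eq_none_iff _ _).mpr h)

lemma zeros_replicate (m : ℕ) : zeros (List.replicate m (0 : Int)) = m := by
  simp [zeros, List.countP_replicate]

lemma zeros_set {edge : List Int} {i : ℕ} {u : Int} (h : i < edge.length)
    (h0 : edge[i] = 0) (hu : u ≠ 0) : zeros (edge.set i u) + 1 = zeros edge := by
  have hpos : 0 < edge.countP (fun a => a == 0) :=
    List.countP_pos_iff.mpr ⟨edge[i], List.getElem_mem h, by simp [h0]⟩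
  unfold zeros
  rw [List.countP_set h]
  simp only [h0]
  norm_num [hu]
  omega

lemma EV_getElem {y : Int} {edge : List Int} (hlen : edge.length = (y + 1).toNat)
    {v : Int} (h0 : 0 ≤ v) (h1 : v ≤ y) :
    EV edge v = edge[v.toNat]'(by have := len_cast hlen h0 h1; omega) := by
  rw [EV, PySem.List.pyGetD_eq_getElem _ 0 h0 (len_cast hlen h0 h1)]

-- ---------- unfolding lemmas for A's loop ----------

lemma solutionLoop_succ_nil (y n : Int) (f : ℕ) (edge : List Int) :
    solutionLoop y n (f + 1) edge [] = -1 := rfl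

lemma solutionLoop_succ_cons (y n : Int) (f : ℕ) (edge : List Int) (tmp : Int) (rest : List Int) :
    solutionLoop y n (f + 1) edge (tmp :: rest) =
      if tmp = y then PySem.List.pyGetD edge tmp (-2)
      else
        (let s := [tmp + n, tmp * 2, tmp * 3].foldl (solutionStep y tmp) (edge, rest)
         solutionLoop y n f s.1 s.2) := rfl

lemma step_skip_high {y tmp num : Int} (s : List Int × List Int) (h : ¬ num ≤ y) :
    solutionStep y tmp s num = s := by
  unfold solutionStep
  rw [if_neg (fun hc => h hc.1)]

lemma step_skip_marked {y tmp num : Int} (s : List Int × List Int)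
    (h : PySem.List.pyGetD s.1 num 1 ≠ 0) : solutionStep y tmp s num = s := by
  unfold solutionStep
  rw [if_neg (fun hc => h hc.2)]

lemma step_mark {y tmp num : Int} (s : List Int × List Int) (h1 : num ≤ y)
    (h2 : PySem.List.pyGetD s.1 num 1 = 0) :
    solutionStep y tmp s num =
      (PySem.List.pySetD s.1 num (PySem.List.pyGetD s.1 tmp 0 + 1), s.2 ++ [num]) := by
  unfold solutionStep
  rw [if_pos ⟨h1, h2⟩]
-- ---------- A's BFS invariant ----------

structure InvBody (x y n : Int) (edge que : List Int) (k : ℕ) (q1 q2 : List Int)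
    (P : Int → Prop) (flag : Bool) : Prop where
  len : edge.length = (y + 1).toNat
  hque : que = q1 ++ q2
  hq1 : ∀ v ∈ q1, (x ≤ v ∧ v ≤ y ∧ IsDist x n v k) ∨ (v = x ∧ flag = true)
  hq2 : ∀ v ∈ q2, (x ≤ v ∧ v ≤ y ∧ IsDist x n v (k + 1)) ∨ (v = x ∧ flag = true)
  hP : ∀ v, P v → v ≤ y ∧ ∃ j, j ≤ k ∧ IsDist x n v j
  hlow : ∀ v j, v ≤ y → j < k → IsDist x n v j → P v
  hlev : ∀ v, v ≤ y → IsDist x n v k → P v ∨ v ∈ q1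
  hdisc : ∀ v, v ≤ y → IsDist x n v (k + 1) → (∃ p, P p ∧ Succ n p v) → v ∈ q2
  hmark : ∀ v, x ≤ v → v ≤ y →
    (EV edge v ≠ 0 ↔ (((∃ j, j ≤ k ∧ IsDist x n v j) ∨ v ∈ q2) ∧ (v = x → flag = true)))
  hlab : ∀ v j, x < v → v ≤ y → IsDist x n v j → EV edge v ≠ 0 → EV edge v = (j : Int) + offs n
  hx : x ≤ y → EV edge x = (if flag = true then 1 else 0)
  hflagA : flag = true → (n = 0 ∨ x = 0) ∧ x < y
  hflagP : flag = true → P x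
  hy : ¬ P y

-- invariant during A's inner 3-step loop; P is the set processed BEFORE popping tmp,
-- S the prefix of tmp's successor list already handled
structure Mid (x y n tmp : Int) (k : ℕ) (P : Int → Prop) (flag : Bool)
    (edge q2c S : List Int) : Prop where
  len : edge.length = (y + 1).toNat
  hq2 : ∀ v ∈ q2c, (x ≤ v ∧ v ≤ y ∧ IsDist x n v (k + 1)) ∨ (v = x ∧ flag = true)
  hdisc : ∀ v, v ≤ y → IsDist x n v (k + 1) →
    ((∃ p, P p ∧ Succ n p v) ∨ v ∈ S) → v ∈ q2c
  hmark : ∀ v, x ≤ v → v ≤ y →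
    (EV edge v ≠ 0 ↔ (((∃ j, j ≤ k ∧ IsDist x n v j) ∨ v ∈ q2c) ∧ (v = x → flag = true)))
  hlab : ∀ v j, x < v → v ≤ y → IsDist x n v j → EV edge v ≠ 0 → EV edge v = (j : Int) + offs n
  hxv : x ≤ y → EV edge x = (if flag = true then 1 else 0)
  hflag : flag = true → (n = 0 ∨ x = 0) ∧ x < y ∧ (P x ∨ x = tmp)
  hfx : tmp = x → (flag = true ↔ ((n = 0 ∨ x = 0) ∧ x ∈ S))

lemma mid_step {x y n tmp num : Int} {k : ℕ} {P : Int → Prop} {flag : Bool}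
    {edge q2c S : List Int}
    (hx0 : 0 ≤ x) (hn0 : 0 ≤ n)
    (hxt : x ≤ tmp) (hty : tmp ≤ y) (htny : tmp ≠ y) (htk : IsDist x n tmp k)
    (hnum : Succ n tmp num)
    (hSx0 : tmp = x → n = 0 → num ≠ x → x ∈ S)
    (hSx1 : tmp = x → n ≠ 0 → num ≠ x → x ∉ S)
    (M : Mid x y n tmp k P flag edge q2c S) :
    ∃ edge' q2c' flag',
      (∀ w : List Int, solutionStep y tmp (edge, w ++ q2c) num = (edge', w ++ q2c')) ∧
      Mid x y n tmp k P flag' edge' q2c' (S ++ [num]) ∧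
      (flag = true → flag' = true) ∧
      q2c'.length + 2 * zeros edge' ≤ q2c.length + 2 * zeros edge := by
  have ht0 : (0 : ℤ) ≤ tmp := le_trans hx0 hxt
  have hnum0 : 0 ≤ num := le_trans ht0 (succ_ge ht0 hn0 hnum)
  have hxnum : x ≤ num := le_trans hxt (succ_ge ht0 hn0 hnum)
  by_cases hylt : num ≤ y
  · have hvlen : num < (edge.length : ℤ) := len_cast M.len hnum0 hylt
    have hread1 : PySem.List.pyGetD edge num 1 = EV edge num := getD_irrel _ hnum0 hvlen 1 0
    by_cases hmk : EV edge num = 0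
    · -- unmarked: A enqueues num and labels it
      have hreadc : PySem.List.pyGetD edge num 1 = 0 := by rw [hread1]; exact hmk
      by_cases hnx : num = x
      · -- re-marking of x itself (only when n = 0 or x = 0): flip flag
        obtain ⟨htx, hn0x⟩ := succ_self_x hx0 hn0 hxt (hnx ▸ hnum)
        have hxy : x < y := by omega
        have hEVx0 : EV edge x = 0 := by rw [← hnx]; exact hmk
        have hflagF : flag = false := by
          cases hfl : flag
          · rfl
          · exfalso
            have hx1 := M.hxv (by omega : x ≤ y)
            rw [hfl, if_pos rfl, hEVx0] at hx1
            exact absurd hx1 (by norm_num)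
        have hk0 : k = 0 := isDist_x (htx ▸ htk)
        have hEVt : EV edge tmp = 0 := by rw [htx]; exact hEVx0
        refine ⟨PySem.List.pySetD edge num (PySem.List.pyGetD edge tmp 0 + 1), q2c ++ [num], true,
          ?_, ?_, fun _ => rfl, ?_⟩
        · intro w
          rw [step_mark _ hylt hreadc, List.append_assoc]
        · have hval1 : PySem.List.pyGetD edge tmp 0 + 1 = 1 := by
            show EV edge tmp + 1 = 1
            rw [hEVt]; norm_num
          rw [hval1]
          have hEV' : ∀ v, 0 ≤ v → v ≤ y →
              EV (PySem.List.pySetD edge num 1) v = if v = num then 1 else EV edge v := by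
            intro v h0 h1
            exact EV_set M.len hnum0 hylt 1 h0 h1
          refine ⟨by rw [PySem.List.length_pySetD]; exact M.len, ?_, ?_, ?_, ?_, ?_, ?_, ?_⟩
          · intro v hv
            rcases List.mem_append.mp hv with hv | hv
            · rcases M.hq2 v hv with ⟨a, b, c⟩ | ⟨a, b⟩
              · exact Or.inl ⟨a, b, c⟩
              · rw [hflagF] at b; exact absurd b (by simp)
            · have : v = num := List.mem_singleton.mp hv
              exact Or.inr ⟨this.trans hnx, rfl⟩
          · intro v hvy hvd hcase
            rcases hcase with hcase | hcase
            · exact List.mem_append_left _ (M.hdisc v hvy hvd (Or.inl hcase))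
            · rcases List.mem_append.mp hcase with hS | hnew
              · exact List.mem_append_left _ (M.hdisc v hvy hvd (Or.inr hS))
              · exfalso
                have hvnum : v = num := List.mem_singleton.mp hnew
                have : k + 1 = 0 := isDist_x (by rw [hvnum, hnx] at hvd; exact hvd)
                omega
          · intro v hxv hvy
            rw [hEV' v (le_trans hx0 hxv) hvy]
            by_cases hvn : v = num
            · have hvx : v = x := hvn.trans hnx
              constructor
              · intro _
                exact ⟨Or.inl ⟨0, Nat.zero_le _, hvx ▸ isDist_x_zero x n⟩, fun _ => rfl⟩
              · intro _
                rw [if_pos hvn]; norm_num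
            · rw [if_neg hvn]
              rw [M.hmark v hxv hvy]
              constructor
              · rintro ⟨h1, _⟩
                refine ⟨?_, fun hvx => absurd (hvx.trans hnx.symm) hvn⟩
                rcases h1 with h1 | h1
                · exact Or.inl h1
                · exact Or.inr (List.mem_append_left _ h1)
              · rintro ⟨h1, _⟩
                refine ⟨?_, fun hvx => absurd (hvx.trans hnx.symm) hvn⟩
                rcases h1 with h1 | h1
                · exact Or.inl h1
                · rcases List.mem_append.mp h1 with h1 | h1
                  · exact Or.inr h1
                  · exact absurd (List.mem_singleton.mp h1) hvn
          · intro v j hxv hvy hvd hne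
            have hvn : v ≠ num := fun hc => by rw [hc, hnx] at hxv; omega
            rw [hEV' v (by omega) hvy, if_neg hvn] at hne ⊢
            exact M.hlab v j hxv hvy hvd hne
          · intro _
            rw [hEV' x hx0 (by omega), if_pos hnx.symm]
            norm_num
          · intro _
            exact ⟨hn0x, hxy, Or.inr htx.symm⟩
          · intro _
            constructor
            · intro _
              exact ⟨hn0x, List.mem_append_right _ (by rw [← hnx]; exact List.mem_singleton_self _)⟩
            · intro _
              rfl
        · have hnat : num.toNat < edge.length := by omega
          have hval1 : PySem.List.pyGetD edge tmp 0 + 1 = 1 := by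
            show EV edge tmp + 1 = 1
            rw [hEVt]; norm_num
          have hz : zeros (edge.set num.toNat 1) + 1 = zeros edge := by
            apply zeros_set hnat _ one_ne_zero
            have hg := EV_getElem M.len hnum0 hylt
            rw [hg] at hmk
            exact hmk
          rw [hval1, PySem.List.pySetD_of_nonneg _ _ hnum0]
          simp only [List.length_append, List.length_singleton]
          omega
      · -- a genuinely new node at distance k+1
        have hxltnum : x < num := lt_of_le_of_ne hxnum (Ne.symm hnx)
        have hreach : Reach x n (k + 1) num := reach_of_succ htk.1 hnum
        have hnd : IsDist x n num (k + 1) := by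
          obtain ⟨m, hm⟩ := exists_isDist ⟨k + 1, hreach⟩
          have hmk1 : m ≤ k + 1 := hm.2 _ hreach
          rcases Nat.lt_or_ge m (k + 1) with hlt | hge
          · exfalso
            have hne := (M.hmark num hxnum hylt).mpr
              ⟨Or.inl ⟨m, by omega, hm⟩, fun h => absurd h hnx⟩
            exact hne hmk
          · have hmeq : m = k + 1 := by omega
            exact hmeq ▸ hm
        have hval : PySem.List.pyGetD edge tmp 0 + 1 = ((k : ℤ) + offs n) + 1 := by
          show EV edge tmp + 1 = ((k : ℤ) + offs n) + 1
          by_cases htx : tmp = x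
          · have hk0 : k = 0 := isDist_x (htx ▸ htk)
            have hEVx := M.hxv (by omega)
            by_cases hnz : n = 0
            · have hfl : flag = true := (M.hfx htx).mpr ⟨Or.inl hnz, hSx0 htx hnz hnx⟩
              rw [htx, hEVx, hfl, hk0]
              simp [offs, hnz]
            · have hfl : flag = false := by
                by_contra hcon
                have hf : flag = true := by revert hcon; cases flag <;> simp
                exact hSx1 htx hnz hnx ((M.hfx htx).mp hf).2
              rw [htx, hEVx, hfl, hk0]
              simp [offs, hnz]
          · have hxlt : x < tmp := lt_of_le_of_ne hxt (Ne.symm htx)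
            have hmkt : EV edge tmp ≠ 0 :=
              (M.hmark tmp hxt hty).mpr ⟨Or.inl ⟨k, le_refl _, htk⟩, fun h => absurd h htx⟩
            rw [M.hlab tmp k hxlt hty htk hmkt]
        refine ⟨PySem.List.pySetD edge num (PySem.List.pyGetD edge tmp 0 + 1), q2c ++ [num], flag,
          ?_, ?_, fun h => h, ?_⟩
        · intro w
          rw [step_mark _ hylt hreadc, List.append_assoc]
        · rw [hval]
          have hpos : ((k : ℤ) + offs n) + 1 ≠ 0 := by
            have := offs_nonneg n
            omega
          have hEV' : ∀ v, 0 ≤ v → v ≤ y →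
              EV (PySem.List.pySetD edge num (((k : ℤ) + offs n) + 1)) v =
                if v = num then ((k : ℤ) + offs n) + 1 else EV edge v := by
            intro v h0 h1
            exact EV_set M.len hnum0 hylt _ h0 h1
          refine ⟨by rw [PySem.List.length_pySetD]; exact M.len, ?_, ?_, ?_, ?_, ?_, ?_, ?_⟩
          · intro v hv
            rcases List.mem_append.mp hv with hv | hv
            · exact M.hq2 v hv
            · have : v = num := List.mem_singleton.mp hv
              exact Or.inl ⟨this ▸ hxnum, this ▸ hylt, this ▸ hnd⟩
          · intro v hvy hvd hcase
            rcases hcase with hcase | hcase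
            · exact List.mem_append_left _ (M.hdisc v hvy hvd (Or.inl hcase))
            · rcases List.mem_append.mp hcase with hS | hnew
              · exact List.mem_append_left _ (M.hdisc v hvy hvd (Or.inr hS))
              · exact List.mem_append_right _ hnew
          · intro v hxv hvy
            rw [hEV' v (le_trans hx0 hxv) hvy]
            by_cases hvn : v = num
            · rw [if_pos hvn]
              constructor
              · intro _
                exact ⟨Or.inr (List.mem_append_right _ (by rw [hvn]; exact List.mem_singleton_self _)),
                  fun hvx => absurd (hvx ▸ hvn : x = num).symm hnx⟩
              · intro _; exact hpos
            · rw [if_neg hvn, M.hmark v hxv hvy]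
              constructor
              · rintro ⟨h1, h2⟩
                refine ⟨?_, h2⟩
                rcases h1 with h1 | h1
                · exact Or.inl h1
                · exact Or.inr (List.mem_append_left _ h1)
              · rintro ⟨h1, h2⟩
                refine ⟨?_, h2⟩
                rcases h1 with h1 | h1
                · exact Or.inl h1
                · rcases List.mem_append.mp h1 with h1 | h1
                  · exact Or.inr h1
                  · exact absurd (List.mem_singleton.mp h1) hvn
          · intro v j hxv hvy hvd hne
            rw [hEV' v (by omega) hvy] at hne ⊢
            by_cases hvn : v = num
            · rw [if_pos hvn] at hne ⊢
              have : j = k + 1 := isDist_unique hvd (hvn ▸ hnd)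
              rw [this]
              push_cast
              ring
            · rw [if_neg hvn] at hne ⊢
              exact M.hlab v j hxv hvy hvd hne
          · intro hxley
            rw [hEV' x hx0 hxley, if_neg (fun hc => hnx hc.symm)]
            exact M.hxv hxley
          · exact M.hflag
          · intro htx
            rw [M.hfx htx]
            constructor
            · rintro ⟨h1, h2⟩
              exact ⟨h1, List.mem_append_left _ h2⟩
            · rintro ⟨h1, h2⟩
              rcases List.mem_append.mp h2 with h2 | h2
              · exact ⟨h1, h2⟩
              · exact absurd (List.mem_singleton.mp h2).symm hnx
        · have hnat : num.toNat < edge.length := by omega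
          have hz : zeros (edge.set num.toNat (PySem.List.pyGetD edge tmp 0 + 1)) + 1 = zeros edge := by
            apply zeros_set hnat
            · have hg := EV_getElem M.len hnum0 hylt
              rw [hg] at hmk
              exact hmk
            · rw [hval]
              have := offs_nonneg n
              omega
          rw [PySem.List.pySetD_of_nonneg _ _ hnum0]
          simp only [List.length_append, List.length_singleton]
          omega
    · -- already marked: skipped
      refine ⟨edge, q2c, flag, ?_, ?_, fun h => h, le_refl _⟩
      · intro w
        apply step_skip_marked
        show PySem.List.pyGetD edge num 1 ≠ 0
        rw [hread1]
        exact hmk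
      · refine ⟨M.len, M.hq2, ?_, M.hmark, M.hlab, M.hxv, M.hflag, ?_⟩
        · intro v hvy hvd hcase
          rcases hcase with hcase | hcase
          · exact M.hdisc v hvy hvd (Or.inl hcase)
          · rcases List.mem_append.mp hcase with hS | hnew
            · exact M.hdisc v hvy hvd (Or.inr hS)
            · have hvnum : v = num := List.mem_singleton.mp hnew
              have hne : EV edge v ≠ 0 := by rw [hvnum]; exact hmk
              have hres := (M.hmark v (by rw [hvnum]; exact hxnum) hvy).mp hne
              rcases hres.1 with h1 | h1
              · exfalso
                obtain ⟨j, hj, hdj⟩ := h1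
                have := isDist_unique hdj hvd
                omega
              · exact h1
        · intro htx
          rw [M.hfx htx]
          constructor
          · rintro ⟨h1, h2⟩
            exact ⟨h1, List.mem_append_left _ h2⟩
          · rintro ⟨h1, h2⟩
            rcases List.mem_append.mp h2 with h2 | h2
            · exact ⟨h1, h2⟩
            · -- x = num and num is marked, hence flag was already true
              have hxnum' : x = num := List.mem_singleton.mp h2
              have hfl : flag = true := ((M.hmark num hxnum hylt).mp hmk).2 hxnum'.symm
              exact (M.hfx htx).mp hfl
  · -- num > y: skipped
    refine ⟨edge, q2c, flag, ?_, ?_, fun h => h, le_refl _⟩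
    · intro w
      exact step_skip_high _ hylt
    · refine ⟨M.len, M.hq2, ?_, M.hmark, M.hlab, M.hxv, M.hflag, ?_⟩
      · intro v hvy hvd hcase
        rcases hcase with hcase | hcase
        · exact M.hdisc v hvy hvd (Or.inl hcase)
        · rcases List.mem_append.mp hcase with hS | hnew
          · exact M.hdisc v hvy hvd (Or.inr hS)
          · exact absurd hvy (by rw [List.mem_singleton.mp hnew]; exact hylt)
      · intro htx
        rw [M.hfx htx]
        have hxn : x ≠ num := fun hc => hylt (hc ▸ le_trans hxt hty)
        constructor
        · rintro ⟨h1, h2⟩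
          exact ⟨h1, List.mem_append_left _ h2⟩
        · rintro ⟨h1, h2⟩
          rcases List.mem_append.mp h2 with h2 | h2
          · exact ⟨h1, h2⟩
          · exact absurd (List.mem_singleton.mp h2) hxn
lemma inv_shift {x y n : Int} (hx0 : 0 ≤ x) (hn0 : 0 ≤ n) {edge que : List Int} {k : ℕ}
    {q2 : List Int} {P : Int → Prop} {flag : Bool}
    (I : InvBody x y n edge que k [] q2 P flag) :
    InvBody x y n edge que (k + 1) q2 [] P flag := by
  have hlev' : ∀ v, v ≤ y → IsDist x n v (k + 1) → v ∈ q2 := by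
    intro v hvy hvd
    obtain ⟨p, hp, hs⟩ := dist_pred hvd
    have hpv : p ≤ v := succ_ge (reach_nonneg hx0 hn0 hp.1) hn0 hs
    have hPp : P p := by
      rcases I.hlev p (by omega) hp with h | h
      · exact h
      · exact absurd h (by simp)
    exact I.hdisc v hvy hvd ⟨p, hPp, hs⟩
  refine ⟨I.len, by rw [I.hque]; simp, I.hq2, by simp, ?_, ?_, ?_, ?_, ?_, I.hlab, I.hx,
    I.hflagA, I.hflagP, I.hy⟩
  · intro v hv
    obtain ⟨h1, j, hj, hd⟩ := I.hP v hv
    exact ⟨h1, j, by omega, hd⟩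
  · intro v j hvy hj hvd
    rcases Nat.lt_or_ge j k with hlt | hge
    · exact I.hlow v j hvy hlt hvd
    · have hjk : j = k := by omega
      rcases I.hlev v hvy (hjk ▸ hvd) with h | h
      · exact h
      · exact absurd h (by simp)
  · intro v hvy hvd
    exact Or.inr (hlev' v hvy hvd)
  · intro v hvy hvd hex
    obtain ⟨p, hPp, hs⟩ := hex
    obtain ⟨_, j, hj, hdp⟩ := I.hP p hPp
    have := hvd.2 (j + 1) (reach_of_succ hdp.1 hs)
    omega
  · intro v hxv hvy
    rw [I.hmark v hxv hvy]
    constructor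
    · rintro ⟨h1, h2⟩
      refine ⟨?_, h2⟩
      left
      rcases h1 with ⟨j, hj, hd⟩ | h1
      · exact ⟨j, by omega, hd⟩
      · rcases I.hq2 v h1 with ⟨_, _, hd⟩ | ⟨hvx, hfl⟩
        · exact ⟨k + 1, le_rfl, hd⟩
        · exact ⟨0, by omega, hvx ▸ isDist_x_zero x n⟩
    · rintro ⟨h1, h2⟩
      refine ⟨?_, h2⟩
      rcases h1 with ⟨j, hj, hd⟩ | h1
      · rcases Nat.lt_or_ge j (k + 1) with hlt | hge
        · exact Or.inl ⟨j, by omega, hd⟩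
        · have hjk : j = k + 1 := by omega
          exact Or.inr (hlev' v hvy (hjk ▸ hd))
      · exact absurd h1 (by simp)

lemma loopA {x y n : Int} (hx0 : 0 ≤ x) (hn0 : 0 ≤ n) (hxy : x < y) :
    ∀ (f : ℕ) (edge que : List Int) (k : ℕ) (q1 q2 : List Int) (P : Int → Prop) (flag : Bool),
      InvBody x y n edge que k q1 q2 P flag → measA edge que ≤ f →
      (∀ m, IsDist x n y m → solutionLoop y n f edge que = (m : Int) + offs n) ∧
      (¬ Reachable x n y → solutionLoop y n f edge que = -1) := by
  intro f
  induction f with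
  | zero =>
    intro edge que k q1 q2 P flag hI hm
    exfalso; unfold measA at hm; omega
  | succ g IH =>
    intro edge que k q1 q2 P flag hI hm
    cases que with
    | nil =>
      cases q1 with
      | cons a t => exact absurd hI.hque (by simp)
      | nil =>
        cases q2 with
        | cons a t => exact absurd hI.hque (by simp)
        | nil =>
          rw [solutionLoop_succ_nil]
          constructor
          · intro m hmd
            exfalso
            rcases Nat.lt_or_ge m k with hlt | hge
            · exact hI.hy (hI.hlow y m le_rfl hlt hmd)
            · rcases Nat.eq_or_lt_of_le hge with heq | hlt2
              · rcases hI.hlev y le_rfl (heq ▸ hmd) with h | h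
                · exact hI.hy h
                · exact absurd h (by simp)
              · obtain ⟨w, hw, hwy⟩ := dist_chain hx0 hn0 m y hmd (k + 1) (by omega)
                obtain ⟨p, hp, hs⟩ := dist_pred hw
                have hpw : p ≤ w := succ_ge (reach_nonneg hx0 hn0 hp.1) hn0 hs
                have hPp : P p := by
                  rcases hI.hlev p (by omega) hp with h | h
                  · exact h
                  · exact absurd h (by simp)
                exact absurd (hI.hdisc w (by omega) hw ⟨p, hPp, hs⟩) (by simp)
          · intro _; rfl
    | cons tmp rest =>
      -- normalize the invariant so that q1 starts with tmp
      obtain ⟨k, q1t, q2, P, flag, hI⟩ :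
          ∃ (k' : ℕ) (q1t q2' : List Int) (P' : Int → Prop) (flag' : Bool),
            InvBody x y n edge (tmp :: rest) k' (tmp :: q1t) q2' P' flag' := by
        cases hq1 : q1 with
        | nil =>
          have hI2 := inv_shift hx0 hn0 (hq1 ▸ hI)
          have hq2c : q2 = tmp :: rest := by
            have h := hI.hque; rw [hq1] at h; simpa using h.symm
          refine ⟨k + 1, rest, [], P, flag, ?_⟩
          rw [hq2c] at hI2
          exact hI2
        | cons a t =>
          have h := hI.hque
          rw [hq1] at h
          simp only [List.cons_append, List.cons.injEq] at h
          obtain ⟨ha, hrest0⟩ := h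
          refine ⟨k, t, q2, P, flag, ?_⟩
          have h2 := hI
          rw [hq1, ← ha] at h2
          exact h2
      have hrest : rest = q1t ++ q2 := by
        have h := hI.hque; simpa using h
      rw [solutionLoop_succ_cons]
      by_cases hty : tmp = y
      · rw [if_pos hty, hty]
        rcases hI.hq1 tmp List.mem_cons_self with ⟨h1, h2, h3⟩ | ⟨h1, h2⟩
        · rw [hty] at h1 h3
          have hyne : y ≠ x := by omega
          have hmarked : EV edge y ≠ 0 :=
            (hI.hmark y h1 le_rfl).mpr ⟨Or.inl ⟨k, le_rfl, h3⟩, fun hc => absurd hc hyne⟩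
          have hlabel := hI.hlab y k (by omega) le_rfl h3 hmarked
          have hbridge : PySem.List.pyGetD edge y (-2) = EV edge y :=
            getD_irrel _ (by omega) (len_cast hI.len (by omega) le_rfl) (-2) 0
          constructor
          · intro m hmd
            have hmk2 : m = k := isDist_unique hmd h3
            rw [hbridge, hlabel, hmk2]
          · intro hnr
            exact absurd ⟨k, h3.1⟩ hnr
        · exfalso; omega
      · rw [if_neg hty]
        by_cases hdead : tmp = x ∧ flag = true
        · -- the dead re-queued x: every successor is already marked
          obtain ⟨htx, hfl⟩ := hdead
          have hskip : ∀ num, Succ n tmp num →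
              solutionStep y tmp (edge, rest) num = (edge, rest) := by
            intro num hnum
            have ht0 : (0 : ℤ) ≤ tmp := by omega
            have hnum0 : 0 ≤ num := le_trans ht0 (succ_ge ht0 hn0 hnum)
            by_cases hnle : num ≤ y
            · apply step_skip_marked
              show PySem.List.pyGetD edge num 1 ≠ 0
              rw [getD_irrel _ hnum0 (len_cast hI.len hnum0 hnle) 1 0]
              show EV edge num ≠ 0
              by_cases hnx : num = x
              · exact (hI.hmark num (by omega) hnle).mpr
                  ⟨Or.inl ⟨0, Nat.zero_le _, by rw [hnx]; exact isDist_x_zero x n⟩, fun _ => hfl⟩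
              · have hxnum : x ≤ num := htx ▸ succ_ge ht0 hn0 hnum
                have hreach : Reach x n 1 num :=
                  reach_of_succ Reach.zero (by rw [← htx]; exact hnum)
                obtain ⟨m, hmd⟩ := exists_isDist ⟨1, hreach⟩
                have hm1 : m ≤ 1 := hmd.2 _ hreach
                have hmne : m ≠ 0 := fun hc => hnx (reach_zero (hc ▸ hmd.1))
                have hm1' : m = 1 := by omega
                subst hm1'
                cases k with
                | zero =>
                  have hq2m : num ∈ q2 :=
                    hI.hdisc num hnle hmd ⟨x, hI.hflagP hfl, by rw [← htx]; exact hnum⟩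
                  exact (hI.hmark num hxnum hnle).mpr ⟨Or.inr hq2m, fun _ => hfl⟩
                | succ k' =>
                  exact (hI.hmark num hxnum hnle).mpr ⟨Or.inl ⟨1, by omega, hmd⟩, fun _ => hfl⟩
            · exact step_skip_high _ hnle
          have hfold : [tmp + n, tmp * 2, tmp * 3].foldl (solutionStep y tmp) (edge, rest)
              = (edge, rest) := by
            simp only [List.foldl_cons, List.foldl_nil, hskip _ (Or.inl rfl),
              hskip _ (Or.inr (Or.inl rfl)), hskip _ (Or.inr (Or.inr rfl))]
          have I2 : InvBody x y n edge rest k q1t q2 P flag := by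
            refine ⟨hI.len, hrest, ?_, hI.hq2, hI.hP, hI.hlow, ?_, hI.hdisc, hI.hmark,
              hI.hlab, hI.hx, hI.hflagA, hI.hflagP, hI.hy⟩
            · intro v hv; exact hI.hq1 v (List.mem_cons_of_mem _ hv)
            · intro v hvy hvd
              rcases hI.hlev v hvy hvd with h | h
              · exact Or.inl h
              · rcases List.mem_cons.mp h with h | h
                · exact Or.inl (by rw [h, htx]; exact hI.hflagP hfl)
                · exact Or.inr h
          rw [hfold]
          have hmeas2 : measA edge rest ≤ g := by
            unfold measA at hm ⊢
            simp only [List.length_cons] at hm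
            omega
          exact IH edge rest k q1t q2 P flag I2 hmeas2
        · -- a fresh node of level k: process its three successors
          have hhead : x ≤ tmp ∧ tmp ≤ y ∧ IsDist x n tmp k := by
            rcases hI.hq1 tmp List.mem_cons_self with h | h
            · exact h
            · exact absurd h hdead
          obtain ⟨hxt, htyle, htk⟩ := hhead
          have M0 : Mid x y n tmp k P flag edge q2 [] := by
            refine ⟨hI.len, hI.hq2, ?_, hI.hmark, hI.hlab, hI.hx, ?_, ?_⟩
            · intro v hvy hvd hc
              rcases hc with hc | hc
              · exact hI.hdisc v hvy hvd hc
              · exact absurd hc (by simp)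
            · intro hf
              exact ⟨(hI.hflagA hf).1, (hI.hflagA hf).2, Or.inl (hI.hflagP hf)⟩
            · intro htxx
              constructor
              · intro hf; exact absurd ⟨htxx, hf⟩ hdead
              · rintro ⟨_, hmem⟩; exact absurd hmem (by simp)
          obtain ⟨e1, q21, f1, hstep1, M1, hmono1, hmeas1⟩ :=
            mid_step hx0 hn0 hxt htyle hty htk (Or.inl rfl)
              (fun htxx hn00 hne => absurd (by omega : tmp + n = x) hne)
              (fun _ _ _ => by simp)
              M0
          obtain ⟨e2, q22, f2, hstep2, M2, hmono2, hmeas2⟩ :=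
            mid_step hx0 hn0 hxt htyle hty htk (Or.inr (Or.inl rfl))
              (fun htxx hn00 hne => by simp; omega)
              (fun htxx hn00 hne => by simp; omega)
              M1
          obtain ⟨e3, q23, f3, hstep3, M3, hmono3, hmeas3⟩ :=
            mid_step hx0 hn0 hxt htyle hty htk (Or.inr (Or.inr rfl))
              (fun htxx hn00 hne => by simp; left; omega)
              (fun htxx hn00 hne => by simp; constructor <;> omega)
              M2
          have hfold : [tmp + n, tmp * 2, tmp * 3].foldl (solutionStep y tmp) (edge, rest)
              = (e3, q1t ++ q23) := by
            rw [hrest]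
            simp only [List.foldl_cons, List.foldl_nil]
            rw [hstep1 q1t, hstep2 q1t, hstep3 q1t]
          have hmono : flag = true → f3 = true := fun hf => hmono3 (hmono2 (hmono1 hf))
          have I2 : InvBody x y n e3 (q1t ++ q23) k q1t q23 (fun v => P v ∨ v = tmp) f3 := by
            refine ⟨M3.len, rfl, ?_, M3.hq2, ?_, ?_, ?_, ?_, M3.hmark, M3.hlab, M3.hxv,
              ?_, ?_, ?_⟩
            · intro v hv
              rcases hI.hq1 v (List.mem_cons_of_mem _ hv) with ⟨h1, h2, h3⟩ | ⟨h1, h2⟩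
              · exact Or.inl ⟨h1, h2, h3⟩
              · exact Or.inr ⟨h1, hmono h2⟩
            · intro v hv
              rcases hv with hv | hv
              · obtain ⟨h1, j, hj, hd⟩ := hI.hP v hv
                exact ⟨h1, j, hj, hd⟩
              · subst hv
                exact ⟨htyle, k, le_rfl, htk⟩
            · intro v j hvy hj hvd
              exact Or.inl (hI.hlow v j hvy hj hvd)
            · intro v hvy hvd
              rcases hI.hlev v hvy hvd with h | h
              · exact Or.inl (Or.inl h)
              · rcases List.mem_cons.mp h with h | h
                · exact Or.inl (Or.inr h)
                · exact Or.inr h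
            · intro v hvy hvd hex
              obtain ⟨p, hp, hs⟩ := hex
              rcases hp with hp | hp
              · exact M3.hdisc v hvy hvd (Or.inl ⟨p, hp, hs⟩)
              · subst hp
                apply M3.hdisc v hvy hvd
                right
                rcases hs with h | h | h <;> simp [h]
            · intro hf
              exact ⟨(M3.hflag hf).1, (M3.hflag hf).2.1⟩
            · intro hf
              exact (M3.hflag hf).2.2
            · rintro (h | h)
              · exact hI.hy h
              · exact hty h.symm
          rw [hfold]
          have hmeasok : measA e3 (q1t ++ q23) ≤ g := by
            unfold measA at hm ⊢
            rw [hrest] at hm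
            simp only [List.length_cons, List.length_append] at hm ⊢
            omega
          exact IH e3 (q1t ++ q23) k q1t q23 _ f3 I2 hmeasok

lemma invInit {x y n : Int} (hx0 : 0 ≤ x) (hn0 : 0 ≤ n) (hxy : x < y) :
    InvBody x y n (List.replicate (y + 1).toNat 0) [x] 0 [x] [] (fun _ => False) false := by
  refine ⟨by simp, by simp, ?_, by simp, ?_, ?_, ?_, ?_, ?_, ?_, ?_, ?_, ?_, ?_⟩
  · intro v hv
    have hvx : v = x := List.mem_singleton.mp hv
    exact Or.inl ⟨le_of_eq hvx.symm, by omega, hvx ▸ isDist_x_zero x n⟩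
  · intro v hv; exact absurd hv (by simp)
  · intro v j _ hj _; omega
  · intro v hvy hvd
    exact Or.inr (List.mem_singleton.mpr (reach_zero hvd.1))
  · intro v _ _ hex
    obtain ⟨p, hp, _⟩ := hex
    exact absurd hp (by simp)
  · intro v hxv hvy
    rw [EV_replicate]
    constructor
    · intro h; exact absurd rfl h
    · rintro ⟨h1, h2⟩
      exfalso
      rcases h1 with ⟨j, hj, hd⟩ | h1
      · have hj0 : j = 0 := by omega
        have hvx : v = x := reach_zero (hj0 ▸ hd).1
        exact absurd (h2 hvx) (by simp)
      · exact absurd h1 (by simp)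
  · intro v j _ _ _ hne
    exact absurd (EV_replicate _ _) hne
  · intro _
    rw [EV_replicate]
    simp
  · intro h; exact absurd h (by simp)
  · intro h; exact absurd h (by simp)
  · exact fun h => h

lemma A_char {x y n : Int} (hx0 : 0 ≤ x) (hn0 : 0 ≤ n) (hxy : x < y) :
    (∀ m, IsDist x n y m → solution x y n = (m : Int) + offs n) ∧
    (¬ Reachable x n y → solution x y n = -1) := by
  unfold solution
  apply loopA hx0 hn0 hxy _ _ _ 0 [x] [] (fun _ => False) false (invInit hx0 hn0 hxy)
  unfold measA
  rw [zeros_replicate]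
  simp only [List.length_singleton]
  omega

lemma A_eval_eq {x n : Int} (hx0 : 0 ≤ x) : solution x x n = 0 := by
  show solutionLoop x n (((2 * x + 6).toNat + 1) + 1) (List.replicate (x + 1).toNat 0) [x] = 0
  rw [solutionLoop_succ_cons, if_pos rfl]
  have hlen : (List.replicate (x + 1).toNat (0 : Int)).length = (x + 1).toNat := by simp
  rw [getD_irrel _ hx0 (by rw [hlen]; omega) (-2) 0]
  exact EV_replicate _ _

lemma A_eval_gt {x y n : Int} (hx0 : 0 ≤ x) (hn0 : 0 ≤ n) (hyx : y < x) : solution x y n = -1 := by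
  show solutionLoop y n (((2 * y + 6).toNat + 1) + 1) (List.replicate (y + 1).toNat 0) [x] = -1
  rw [solutionLoop_succ_cons, if_neg (by omega : ¬ x = y)]
  have h1 : ¬ (x + n ≤ y) := by omega
  have h2 : ¬ (x * 2 ≤ y) := by omega
  have h3 : ¬ (x * 3 ≤ y) := by omega
  simp only [List.foldl_cons, List.foldl_nil, step_skip_high _ h1, step_skip_high _ h2,
    step_skip_high _ h3]
  exact solutionLoop_succ_nil y n ((2 * y + 6).toNat) (List.replicate (y + 1).toNat 0)
-- ---------- B's DP invariant ----------

def Cand (x n i v : Int) (m : ℕ) : Prop :=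
  (v = x ∧ m = 0) ∨ (∃ p, ∃ j : ℕ, x ≤ p ∧ p < i ∧ IsDist x n p j ∧ Succ n p v ∧ m = j + 1)

def CandS (x n i : Int) (m0 : ℕ) (Sb : List Int) (v : Int) (m : ℕ) : Prop :=
  Cand x n i v m ∨ (v ∈ Sb ∧ m = m0 + 1)

lemma cand_reach {x n i v : Int} {m : ℕ} (h : Cand x n i v m) : Reach x n m v := by
  rcases h with ⟨hv, hm⟩ | ⟨p, j, _, _, hd, hs, hm⟩
  · subst hv; subst hm; exact Reach.zero
  · subst hm; exact reach_of_succ hd.1 hs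

lemma cand_complete {x n v i : Int} {m : ℕ} (hx0 : 0 ≤ x) (hn0 : 0 ≤ n)
    (hvi : v ≤ i) (hd : IsDist x n v m) : Cand x n i v m := by
  cases m with
  | zero => exact Or.inl ⟨reach_zero hd.1, rfl⟩
  | succ m =>
    obtain ⟨p, hp, hs⟩ := dist_pred hd
    have hpx : x ≤ p := reach_le hx0 hn0 hp.1
    have hpv : p ≤ v := succ_ge (le_trans hx0 hpx) hn0 hs
    have hpnev : p ≠ v := by
      intro hc
      have := isDist_unique (hc ▸ hp) hd
      omega
    exact Or.inr ⟨p, m, hpx, by omega, hp, hs, rfl⟩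

lemma cand_succ {x n i v : Int} {m : ℕ} :
    Cand x n (i + 1) v m ↔
      Cand x n i v m ∨ (x ≤ i ∧ ∃ j : ℕ, IsDist x n i j ∧ Succ n i v ∧ m = j + 1) := by
  constructor
  · rintro (h | ⟨p, j, h1, h2, h3, h4, h5⟩)
    · exact Or.inl (Or.inl h)
    · rcases lt_or_eq_of_le (by omega : p ≤ i) with hlt | heq
      · exact Or.inl (Or.inr ⟨p, j, h1, hlt, h3, h4, h5⟩)
      · subst heq; exact Or.inr ⟨h1, j, h3, h4, h5⟩
  · rintro ((h | ⟨p, j, h1, h2, h3, h4, h5⟩) | ⟨hxi, j, h3, h4, h5⟩)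
    · exact Or.inl h
    · exact Or.inr ⟨p, j, h1, by omega, h3, h4, h5⟩
    · exact Or.inr ⟨i, j, hxi, by omega, h3, h4, h5⟩

structure InvB (x y n : Int) (dp : Array Int) (i : Int) : Prop where
  len : dp.size = (y + 1).toNat
  hval : ∀ v, 0 ≤ v → v ≤ y →
    (EVB dp v = -1 ∧ ∀ m, ¬ Cand x n i v m) ∨
    (∃ m : ℕ, EVB dp v = (m : Int) ∧ Cand x n i v m ∧ ∀ m', Cand x n i v m' → m ≤ m')

structure MidB (x y n i : Int) (m0 : ℕ) (dp : Array Int) (Sb : List Int) : Prop where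
  len : dp.size = (y + 1).toNat
  hval : ∀ v, 0 ≤ v → v ≤ y →
    (EVB dp v = -1 ∧ ∀ m, ¬ CandS x n i m0 Sb v m) ∨
    (∃ m : ℕ, EVB dp v = (m : Int) ∧ CandS x n i m0 Sb v m ∧ ∀ m', CandS x n i m0 Sb v m' → m ≤ m')

lemma relaxB_eq (y d : Int) (dp : Array Int) (j : Int) :
    solutionAltRelax y d dp j =
      if j ≤ y ∧ (EVB dp j < 0 ∨ EVB dp j > d + 1) then pyASetD dp j (d + 1)
      else dp := rfl

lemma relaxB_step {x y n i j : Int} {m0 : ℕ} {dp : Array Int} {Sb : List Int}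
    (hx0 : 0 ≤ x) (hn0 : 0 ≤ n) (hxi : x ≤ i) (hj : Succ n i j)
    (M : MidB x y n i m0 dp Sb) :
    MidB x y n i m0 (solutionAltRelax y ((m0 : ℤ)) dp j) (Sb ++ [j]) := by
  have hi0 : (0 : ℤ) ≤ i := le_trans hx0 hxi
  have hj0 : 0 ≤ j := le_trans hi0 (succ_ge hi0 hn0 hj)
  rw [relaxB_eq]
  by_cases hjy : j ≤ y
  · rcases M.hval j hj0 hjy with ⟨hv, hnc⟩ | ⟨m1, hv, hc, hmin⟩
    · -- unset: write m0 + 1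
      rw [if_pos ⟨hjy, Or.inl (by rw [hv]; norm_num)⟩]
      refine ⟨by rw [size_pyASetD]; exact M.len, ?_⟩
      intro v h0 h1
      rw [EVB_set M.len hj0 hjy _ h0 h1]
      by_cases hvj : v = j
      · subst hvj
        right
        refine ⟨m0 + 1, by rw [if_pos rfl]; push_cast; ring,
          Or.inr ⟨List.mem_append_right _ (List.mem_singleton_self _), rfl⟩, ?_⟩
        intro m' hm'
        rcases hm' with hm' | ⟨_, hm'⟩
        · exact absurd (Or.inl hm' : CandS x n i m0 Sb v m') (hnc m')
        · omega
      · rw [if_neg hvj]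
        rcases M.hval v h0 h1 with ⟨hv2, hnc2⟩ | ⟨m2, hv2, hc2, hmin2⟩
        · left
          refine ⟨hv2, ?_⟩
          intro m hmc
          rcases hmc with hmc | ⟨hmem, hmc⟩
          · exact hnc2 m (Or.inl hmc)
          · rcases List.mem_append.mp hmem with h | h
            · exact hnc2 m (Or.inr ⟨h, hmc⟩)
            · exact hvj (List.mem_singleton.mp h)
        · right
          refine ⟨m2, hv2, ?_, ?_⟩
          · rcases hc2 with h | ⟨hmem, hmc⟩
            · exact Or.inl h
            · exact Or.inr ⟨List.mem_append_left _ hmem, hmc⟩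
          · intro m' hm'
            rcases hm' with hm' | ⟨hmem, hm'⟩
            · exact hmin2 m' (Or.inl hm')
            · rcases List.mem_append.mp hmem with h | h
              · exact hmin2 m' (Or.inr ⟨h, hm'⟩)
              · exact absurd (List.mem_singleton.mp h) hvj
    · -- already set to m1
      by_cases hgt : (m1 : ℤ) > (m0 : ℤ) + 1
      · rw [if_pos ⟨hjy, Or.inr (by rw [hv]; exact hgt)⟩]
        refine ⟨by rw [size_pyASetD]; exact M.len, ?_⟩
        intro v h0 h1
        rw [EVB_set M.len hj0 hjy _ h0 h1]
        by_cases hvj : v = j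
        · subst hvj
          right
          refine ⟨m0 + 1, by rw [if_pos rfl]; push_cast; ring,
            Or.inr ⟨List.mem_append_right _ (List.mem_singleton_self _), rfl⟩, ?_⟩
          intro m' hm'
          rcases hm' with hm' | ⟨_, hm'⟩
          · have := hmin m' (Or.inl hm')
            omega
          · omega
        · rw [if_neg hvj]
          rcases M.hval v h0 h1 with ⟨hv2, hnc2⟩ | ⟨m2, hv2, hc2, hmin2⟩
          · left
            refine ⟨hv2, ?_⟩
            intro m hmc
            rcases hmc with hmc | ⟨hmem, hmc⟩
            · exact hnc2 m (Or.inl hmc)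
            · rcases List.mem_append.mp hmem with h | h
              · exact hnc2 m (Or.inr ⟨h, hmc⟩)
              · exact hvj (List.mem_singleton.mp h)
          · right
            refine ⟨m2, hv2, ?_, ?_⟩
            · rcases hc2 with h | ⟨hmem, hmc⟩
              · exact Or.inl h
              · exact Or.inr ⟨List.mem_append_left _ hmem, hmc⟩
            · intro m' hm'
              rcases hm' with hm' | ⟨hmem, hm'⟩
              · exact hmin2 m' (Or.inl hm')
              · rcases List.mem_append.mp hmem with h | h
                · exact hmin2 m' (Or.inr ⟨h, hm'⟩)
                · exact absurd (List.mem_singleton.mp h) hvj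
      · -- keep m1 (m1 ≤ m0 + 1)
        rw [if_neg (by
          rintro ⟨_, hor⟩
          rcases hor with h | h
          · rw [hv] at h; omega
          · rw [hv] at h; omega)]
        refine ⟨M.len, ?_⟩
        intro v h0 h1
        by_cases hvj : v = j
        · subst hvj
          right
          refine ⟨m1, hv, ?_, ?_⟩
          · rcases hc with h | ⟨hmem, hmc⟩
            · exact Or.inl h
            · exact Or.inr ⟨List.mem_append_left _ hmem, hmc⟩
          · intro m' hm'
            rcases hm' with hm' | ⟨hmem, hm'⟩
            · exact hmin m' (Or.inl hm')
            · rcases List.mem_append.mp hmem with h | h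
              · exact hmin m' (Or.inr ⟨h, hm'⟩)
              · omega
        · rcases M.hval v h0 h1 with ⟨hv2, hnc2⟩ | ⟨m2, hv2, hc2, hmin2⟩
          · left
            refine ⟨hv2, ?_⟩
            intro m hmc
            rcases hmc with hmc | ⟨hmem, hmc⟩
            · exact hnc2 m (Or.inl hmc)
            · rcases List.mem_append.mp hmem with h | h
              · exact hnc2 m (Or.inr ⟨h, hmc⟩)
              · exact hvj (List.mem_singleton.mp h)
          · right
            refine ⟨m2, hv2, ?_, ?_⟩
            · rcases hc2 with h | ⟨hmem, hmc⟩
              · exact Or.inl h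
              · exact Or.inr ⟨List.mem_append_left _ hmem, hmc⟩
            · intro m' hm'
              rcases hm' with hm' | ⟨hmem, hm'⟩
              · exact hmin2 m' (Or.inl hm')
              · rcases List.mem_append.mp hmem with h | h
                · exact hmin2 m' (Or.inr ⟨h, hm'⟩)
                · exact absurd (List.mem_singleton.mp h) hvj
  · -- j > y: nothing happens
    rw [if_neg (fun hc => hjy hc.1)]
    refine ⟨M.len, ?_⟩
    intro v h0 h1
    have hvj : v ≠ j := fun hc => hjy (hc ▸ h1)
    rcases M.hval v h0 h1 with ⟨hv2, hnc2⟩ | ⟨m2, hv2, hc2, hmin2⟩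
    · left
      refine ⟨hv2, ?_⟩
      intro m hmc
      rcases hmc with hmc | ⟨hmem, hmc⟩
      · exact hnc2 m (Or.inl hmc)
      · rcases List.mem_append.mp hmem with h | h
        · exact hnc2 m (Or.inr ⟨h, hmc⟩)
        · exact hvj (List.mem_singleton.mp h)
    · right
      refine ⟨m2, hv2, ?_, ?_⟩
      · rcases hc2 with h | ⟨hmem, hmc⟩
        · exact Or.inl h
        · exact Or.inr ⟨List.mem_append_left _ hmem, hmc⟩
      · intro m' hm'
        rcases hm' with hm' | ⟨hmem, hm'⟩
        · exact hmin2 m' (Or.inl hm')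
        · rcases List.mem_append.mp hmem with h | h
          · exact hmin2 m' (Or.inr ⟨h, hm'⟩)
          · exact absurd (List.mem_singleton.mp h) hvj

lemma solutionAltBody_eq (y n : Int) (dp : Array Int) (i : Int) :
    solutionAltBody y n dp i =
      if EVB dp i < 0 then dp
      else [i + n, i * 2, i * 3].foldl (solutionAltRelax y (EVB dp i)) dp := rfl

lemma stepB {x y n i : Int} (hx0 : 0 ≤ x) (hn0 : 0 ≤ n) (hxi : x ≤ i) (hiy : i ≤ y)
    {dp : Array Int} (hI : InvB x y n dp i) : InvB x y n (solutionAltBody y n dp i) (i + 1) := by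
  have hi0 : (0 : ℤ) ≤ i := le_trans hx0 hxi
  rw [solutionAltBody_eq]
  rcases hI.hval i hi0 hiy with ⟨hv, hnc⟩ | ⟨m0, hv, hc, hmin⟩
  · rw [hv, if_pos (by norm_num)]
    have hunreach : ¬ Reachable x n i := by
      intro hr
      obtain ⟨m, hmd⟩ := exists_isDist hr
      exact hnc m (cand_complete hx0 hn0 le_rfl hmd)
    refine ⟨hI.len, ?_⟩
    intro v h0 h1
    have hiff : ∀ m, Cand x n (i + 1) v m ↔ Cand x n i v m := by
      intro m
      rw [cand_succ]
      constructor
      · rintro (h | ⟨_, j, hjd, _, _⟩)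
        · exact h
        · exact absurd ⟨j, hjd.1⟩ hunreach
      · exact Or.inl
    rcases hI.hval v h0 h1 with ⟨hv2, hnc2⟩ | ⟨m2, h2, h3, h4⟩
    · exact Or.inl ⟨hv2, fun m hmc => hnc2 m ((hiff m).mp hmc)⟩
    · exact Or.inr ⟨m2, h2, (hiff m2).mpr h3, fun m' hm' => h4 m' ((hiff m').mp hm')⟩
  · have hdist : IsDist x n i m0 := by
      have hr : Reach x n m0 i := cand_reach hc
      obtain ⟨di, hdi⟩ := exists_isDist ⟨m0, hr⟩
      have h1 : di ≤ m0 := hdi.2 _ hr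
      have h2 : m0 ≤ di := hmin di (cand_complete hx0 hn0 le_rfl hdi)
      have hdm : di = m0 := by omega
      exact hdm ▸ hdi
    rw [hv, if_neg (by push_cast; omega)]
    have M0 : MidB x y n i m0 dp [] := by
      refine ⟨hI.len, ?_⟩
      intro v h0 h1
      rcases hI.hval v h0 h1 with ⟨h2, h3⟩ | ⟨m2, h2, h3, h4⟩
      · refine Or.inl ⟨h2, ?_⟩
        intro m hmc
        rcases hmc with hmc | ⟨hmem, _⟩
        · exact h3 m hmc
        · exact absurd hmem (by simp)
      · refine Or.inr ⟨m2, h2, Or.inl h3, ?_⟩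
        intro m' hm'
        rcases hm' with hm' | ⟨hmem, _⟩
        · exact h4 m' hm'
        · exact absurd hmem (by simp)
    have M1 := relaxB_step hx0 hn0 hxi (Or.inl rfl) M0
    have M2 := relaxB_step hx0 hn0 hxi (Or.inr (Or.inl rfl)) M1
    have M3 := relaxB_step hx0 hn0 hxi (Or.inr (Or.inr rfl)) M2
    simp only [List.foldl_cons, List.foldl_nil]
    have hiff : ∀ v m, v ≤ y →
        (CandS x n i m0 ((([] : List Int) ++ [i + n]) ++ [i * 2] ++ [i * 3]) v m ↔
          Cand x n (i + 1) v m) := by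
      intro v m _
      constructor
      · rintro (h | ⟨hmem, hmc⟩)
        · exact cand_succ.mpr (Or.inl h)
        · have hs : Succ n i v := by
            simp only [List.nil_append, List.mem_append, List.mem_singleton] at hmem
            rcases hmem with (h | h) | h
            · exact Or.inl h
            · exact Or.inr (Or.inl h)
            · exact Or.inr (Or.inr h)
          exact cand_succ.mpr (Or.inr ⟨hxi, m0, hdist, hs, hmc⟩)
      · intro h
        rcases cand_succ.mp h with h | ⟨_, j, hdj, hs, hmc⟩
        · exact Or.inl h
        · have hjm : j = m0 := isDist_unique hdj hdist
          refine Or.inr ⟨?_, by omega⟩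
          rcases hs with h | h | h <;> simp [h]
    refine ⟨M3.len, ?_⟩
    intro v h0 h1
    rcases M3.hval v h0 h1 with ⟨h2, h3⟩ | ⟨m2, h2, h3, h4⟩
    · exact Or.inl ⟨h2, fun m hmc => h3 m ((hiff v m h1).mpr hmc)⟩
    · exact Or.inr ⟨m2, h2, (hiff v m2 h1).mp h3, fun m' hm' => h4 m' ((hiff v m' h1).mpr hm')⟩

lemma loopB {x y n : Int} (hx0 : 0 ≤ x) (hn0 : 0 ≤ n) :
    ∀ (t : ℕ) (i : Int), x ≤ i → i + (t : ℤ) = y + 1 →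
      ∀ dp, InvB x y n dp i →
      InvB x y n ((PySem.List.pyRange i (y + 1) 1).foldl (solutionAltBody y n) dp) (y + 1) := by
  intro t
  induction t with
  | zero =>
    intro i hxi ht dp hI
    rw [PySem.List.pyRange_one_eq_nil (by omega : y + 1 ≤ i)]
    simp only [List.foldl_nil]
    have hieq : i = y + 1 := by omega
    exact hieq ▸ hI
  | succ t ih =>
    intro i hxi ht dp hI
    have hiy : i < y + 1 := by push_cast at ht; omega
    rw [PySem.List.pyRange_one_cons hiy, List.foldl_cons]
    exact ih (i + 1) (by omega) (by push_cast at ht ⊢; omega) _ (stepB hx0 hn0 hxi (by omega) hI)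

lemma solution_alt_eq (x y n : Int) :
    solution_alt x y n =
      if y < x then -1
      else EVB ((PySem.List.pyRange x (y + 1) 1).foldl (solutionAltBody y n)
        (pyASetD (Array.replicate (y + 1).toNat (-1 : Int)) x 0)) y := rfl

lemma B_init {x y n : Int} (hx0 : 0 ≤ x) (hxy : x ≤ y) :
    InvB x y n (pyASetD (Array.replicate (y + 1).toNat (-1 : Int)) x 0) x := by
  have hlen : (Array.replicate (y + 1).toNat (-1 : Int)).size = (y + 1).toNat := by simp
  refine ⟨by rw [size_pyASetD]; exact hlen, ?_⟩
  intro v h0 h1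
  have hEV : EVB (pyASetD (Array.replicate (y + 1).toNat (-1 : Int)) x 0) v
      = if v = x then 0 else -1 := by
    rw [EVB_set hlen hx0 hxy 0 h0 h1]
    by_cases hvx : v = x
    · rw [if_pos hvx, if_pos hvx]
    · rw [if_neg hvx, if_neg hvx]
      show pyAGetD _ v (-2) = -1
      rw [pyAGetD_in h0 (by rw [hlen]; omega)]
      simp
  by_cases hvx : v = x
  · right
    refine ⟨0, by rw [hEV, if_pos hvx]; norm_num, Or.inl ⟨hvx, rfl⟩, fun m' _ => Nat.zero_le m'⟩
  · left
    refine ⟨by rw [hEV, if_neg hvx], ?_⟩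
    rintro m (⟨hvx', _⟩ | ⟨p, j, hp1, hp2, _, _, _⟩)
    · exact hvx hvx'
    · omega

lemma B_char {x y n : Int} (hx0 : 0 ≤ x) (hn0 : 0 ≤ n) (hxy : x ≤ y) :
    (∀ m, IsDist x n y m → solution_alt x y n = (m : Int)) ∧
    (¬ Reachable x n y → solution_alt x y n = -1) := by
  rw [solution_alt_eq, if_neg (by omega : ¬ y < x)]
  have hfin := loopB hx0 hn0 (y + 1 - x).toNat x le_rfl (by omega) _ (B_init hx0 hxy)
  constructor
  · intro m hmd
    rcases hfin.hval y (by omega) le_rfl with ⟨_, hnc⟩ | ⟨m2, h2, h3, h4⟩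
    · exact absurd (cand_complete hx0 hn0 (by omega) hmd) (hnc m)
    · have hle1 : m2 ≤ m := h4 m (cand_complete hx0 hn0 (by omega) hmd)
      have hle2 : m ≤ m2 := hmd.2 m2 (cand_reach h3)
      rw [h2]
      congr 1
      omega
  · intro hnr
    rcases hfin.hval y (by omega) le_rfl with ⟨h2, _⟩ | ⟨m2, _, h3, _⟩
    · exact h2
    · exact absurd ⟨m2, cand_reach h3⟩ hnr
-- ---------- final assembly ----------

theorem solution_spec : Claim_unchanged_solution := by
  unfold Claim_unchanged_solution
  intro x y n hdom hpre
  unfold Spec_solution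
  intro hnd
  obtain ⟨hx0, hn0⟩ := hpre
  have hyB : y ≤ 2 ^ 31 := by
    unfold Dom_solution pvDomInt at hdom
    simp only [Bool.and_eq_true, decide_eq_true_eq] at hdom
    have h31 : (2 : ℤ) ^ 31 = 2147483648 := by norm_num
    omega
  rcases lt_trichotomy x y with hlt | heq | hgt
  · by_cases hr : Reachable x n y
    · obtain ⟨m, hmd⟩ := exists_isDist hr
      rw [(A_char hx0 hn0 hlt).1 m hmd, (B_char hx0 hn0 (le_of_lt hlt)).1 m hmd]
      have hoffs : offs n = 0 := by
        unfold offs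
        rw [if_neg]
        intro hn00
        apply hnd
        subst hn00
        exact ⟨rfl, hlt, D_of_reach hx0 hlt hyB hr⟩
      rw [hoffs]
      ring
    · rw [(A_char hx0 hn0 hlt).2 hr, (B_char hx0 hn0 (le_of_lt hlt)).2 hr]
  · subst heq
    rw [A_eval_eq hx0, (B_char hx0 hn0 le_rfl).1 0 (isDist_x_zero x n)]
    norm_num
  · rw [A_eval_gt hx0 hn0 hgt, solution_alt_eq, if_pos hgt]

theorem solution_changed : Claim_changed_solution := by
  unfold Claim_changed_solution
  decide

theorem solution_tight : Claim_exact_solution := by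
  unfold Claim_exact_solution
  intro x y n hdom hpre hD
  obtain ⟨hx0, hn0⟩ := hpre
  obtain ⟨hn00, hlt, a, ha, b, hb, hab⟩ := hD
  subst hn00
  have hr : Reachable x 0 y := ⟨a + b, by rw [hab]; exact factor_reach x a b⟩
  obtain ⟨m, hmd⟩ := exists_isDist hr
  rw [(A_char hx0 hn0 hlt).1 m hmd, (B_char hx0 hn0 (le_of_lt hlt)).1 m hmd]
  unfold offs
  rw [if_pos rfl]
  omega
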